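-- pv_equiv track=rewrite | github.com/jameshighcharts/javisLLM- | scripts/export_supabase_run_to_legacy_csv.py | build_labels_by_key
-- ===== SOURCE A (Python) =====
-- from typing import Any, Dict, Iterable, List, Sequence
--
-- def build_labels_by_key(
--     ordered_entity_keys: Sequence[str],
--     mention_rows: Sequence[Dict[str, Any]],
--     competitor_rows: Sequence[Dict[str, Any]],
-- ) -> Dict[str, str]:
--     labels: Dict[str, str] = {}
--     for row in competitor_rows:
--         key = str(row.get("slug") or "").strip()
--         label = str(row.get("name") or "").strip()
--         if key and label:
--             labels[key] = label
--     for row in mention_rows: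
--         key = str(row.get("entity_key") or "").strip()
--         label = str(row.get("entity") or "").strip()
--         if key and label and key not in labels:
--             labels[key] = label
--     return {key: labels.get(key, key) for key in ordered_entity_keys}
-- ===== SOURCE B (Python) =====
-- def build_labels_by_key(ordered_entity_keys, mention_rows, competitor_rows):
--     def first_match(rows, key_field, label_field, wanted):
--         # first row (in the given iteration order) whose valid stripped key equals wanted
--         for row in rows:
--             key = str(row.get(key_field) or "").strip()
--             label = str(row.get(label_field) or "").strip()
--             if key and label and key == wanted:
--                 return label
--         return None
--
--     def lookup(k):
--         # no intermediate maps: competitor rows scanned newest-first (last-wins),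
--         # then mention rows oldest-first (first-wins), else the key itself
--         hit = first_match(reversed(competitor_rows), "slug", "name", k)
--         if hit is None:
--             hit = first_match(mention_rows, "entity_key", "entity", k)
--         return k if hit is None else hit
--
--     return {k: lookup(k) for k in ordered_entity_keys}
-- ===== Notes on version B (the rewrite author's own statement) =====
-- stated objective: alternative
-- what changed: B builds no label dictionary at all: for each requested key it directly scans competitor_rows newest-first (realising last-wins) and then mention_rows oldest-first (realising first-wins) for the first matching valid row, a per-query linear search replacing A's precomputed map.
import Mathlib
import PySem

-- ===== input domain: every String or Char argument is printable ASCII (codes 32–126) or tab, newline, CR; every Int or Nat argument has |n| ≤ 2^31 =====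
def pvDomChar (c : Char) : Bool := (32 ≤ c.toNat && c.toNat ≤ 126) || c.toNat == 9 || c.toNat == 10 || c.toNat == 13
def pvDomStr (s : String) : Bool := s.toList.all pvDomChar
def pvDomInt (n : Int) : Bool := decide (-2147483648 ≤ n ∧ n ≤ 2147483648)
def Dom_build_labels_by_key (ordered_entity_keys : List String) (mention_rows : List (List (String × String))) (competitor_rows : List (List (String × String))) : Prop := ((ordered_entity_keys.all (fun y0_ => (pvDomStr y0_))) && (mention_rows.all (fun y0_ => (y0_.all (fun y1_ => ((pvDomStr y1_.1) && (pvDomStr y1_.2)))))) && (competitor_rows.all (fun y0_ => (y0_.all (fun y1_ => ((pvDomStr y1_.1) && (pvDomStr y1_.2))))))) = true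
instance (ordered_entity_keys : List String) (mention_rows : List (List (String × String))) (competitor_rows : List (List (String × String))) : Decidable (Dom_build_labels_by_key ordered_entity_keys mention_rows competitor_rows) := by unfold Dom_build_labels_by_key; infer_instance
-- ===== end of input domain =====

-- B drops A's precomputed label dictionary entirely: each requested key is resolved by a direct
-- per-key scan of competitor_rows newest-first, then mention_rows oldest-first: alternative algorithm, not faster.


-- ===== PORT A =====
-- str(row.get(f) or "").strip(): on this domain values are strings, so str() is the identity and
-- `or ""` collapses both a missing key and "" to "" — exactly ((Dict.mk row).get? f).getD "" then PySem.Str.strip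
def pvGetStrip (row : List (String × String)) (field : String) : String :=
  PySem.Str.strip (((PySem.Dict.mk row).get? field).getD "")

def build_labels_by_key (ordered_entity_keys : List String) (mention_rows : List (List (String × String))) (competitor_rows : List (List (String × String))) : List (String × String) :=
  let labels1 : PySem.Dict String String := competitor_rows.foldl (fun d row =>
    let key := pvGetStrip row "slug"
    let label := pvGetStrip row "name"
    if key ≠ "" ∧ label ≠ "" then d.insert key label else d) PySem.Dict.empty
  let labels2 := mention_rows.foldl (fun d row =>
    let key := pvGetStrip row "entity_key"
    let label := pvGetStrip row "entity"
    if key ≠ "" ∧ label ≠ "" ∧ d.contains key = false then d.insert key label else d) labels1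
  (ordered_entity_keys.foldl (fun out k => out.insert k (labels2.getD k k)) PySem.Dict.empty).items

-- ===== PORT B =====
-- Source B's first_match: first row of `rows` whose valid stripped key equals `wanted`, returning its stripped label
def pvFirstMatch (rows : List (List (String × String))) (key_field label_field wanted : String) : Option String :=
  match rows with
  | [] => none
  | row :: rest =>
    let key := pvGetStrip row key_field
    let label := pvGetStrip row label_field
    if key ≠ "" ∧ label ≠ "" ∧ key = wanted then some label
    else pvFirstMatch rest key_field label_field wanted

-- Source B's lookup: competitor rows newest-first, then mention rows oldest-first, else the key itself
def pvLookup (mention_rows competitor_rows : List (List (String × String))) (k : String) : String :=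
  match pvFirstMatch competitor_rows.reverse "slug" "name" k with
  | some v => v
  | none =>
    match pvFirstMatch mention_rows "entity_key" "entity" k with
    | some v => v
    | none => k

def build_labels_by_key_alt (ordered_entity_keys : List String) (mention_rows : List (List (String × String))) (competitor_rows : List (List (String × String))) : List (String × String) :=
  (ordered_entity_keys.foldl (fun out k =>
    out.insert k (pvLookup mention_rows competitor_rows k)) PySem.Dict.empty).items

-- ===== PRECONDITION & SPEC =====
def Spec_build_labels_by_key (ordered_entity_keys : List String) (mention_rows : List (List (String × String))) (competitor_rows : List (List (String × String))) (out : List (String × String)) : Prop := out = build_labels_by_key_alt ordered_entity_keys mention_rows competitor_rows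
instance (ordered_entity_keys : List String) (mention_rows : List (List (String × String))) (competitor_rows : List (List (String × String))) (out : List (String × String)) : Decidable (Spec_build_labels_by_key ordered_entity_keys mention_rows competitor_rows out) := by unfold Spec_build_labels_by_key; infer_instance

-- ===== CLAIM (what is proved, stated in full; the proofs are below) =====
def Claim_equal_build_labels_by_key : Prop := ∀ (ordered_entity_keys : List String) (mention_rows : List (List (String × String))) (competitor_rows : List (List (String × String))), Dom_build_labels_by_key ordered_entity_keys mention_rows competitor_rows → Spec_build_labels_by_key ordered_entity_keys mention_rows competitor_rows (build_labels_by_key ordered_entity_keys mention_rows competitor_rows)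

-- ===== LEMMAS AND PROOFS =====
set_option maxHeartbeats 1000000

-- A's competitor fold (last insert wins) looked up at x = B's first match over the reversed rows
lemma comp_foldr_get (l : List (List (String × String))) (x : String) :
    (l.foldr (fun row (d : PySem.Dict String String) =>
      let key := pvGetStrip row "slug"
      let label := pvGetStrip row "name"
      if key ≠ "" ∧ label ≠ "" then d.insert key label else d) PySem.Dict.empty).get? x
    = pvFirstMatch l "slug" "name" x := by
  induction l with
  | nil => simp [pvFirstMatch]
  | cons row rest ih =>
    simp only [List.foldr_cons, pvFirstMatch]
    by_cases hg : pvGetStrip row "slug" ≠ "" ∧ pvGetStrip row "name" ≠ ""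
    · rw [if_pos hg, PySem.Dict.get?_insert]
      by_cases hx : x = pvGetStrip row "slug"
      · rw [if_pos hx, if_pos ⟨hg.1, hg.2, hx.symm⟩]
      · rw [if_neg hx, if_neg (by tauto), ih]
    · rw [if_neg hg, if_neg (by tauto), ih]

lemma comp_get (crows : List (List (String × String))) (x : String) :
    (crows.foldl (fun d row =>
      let key := pvGetStrip row "slug"
      let label := pvGetStrip row "name"
      if key ≠ "" ∧ label ≠ "" then d.insert key label else d) PySem.Dict.empty).get? x
    = pvFirstMatch crows.reverse "slug" "name" x := by
  rw [← comp_foldr_get crows.reverse x, ← List.foldl_reverse, List.reverse_reverse]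

-- A's mention loop: existing (competitor) entries win, otherwise the first valid matching mention row
lemma mention_get (mrows : List (List (String × String))) (x : String) :
    ∀ C : PySem.Dict String String,
    (mrows.foldl (fun d row =>
      let key := pvGetStrip row "entity_key"
      let label := pvGetStrip row "entity"
      if key ≠ "" ∧ label ≠ "" ∧ d.contains key = false then d.insert key label else d) C).get? x
    = (C.get? x).or (pvFirstMatch mrows "entity_key" "entity" x) := by
  induction mrows with
  | nil => intro C; simp [pvFirstMatch]
  | cons row rest ih =>
    intro C
    rw [List.foldl_cons, ih]
    simp only [pvFirstMatch]
    by_cases h1 : pvGetStrip row "entity_key" ≠ "" ∧ pvGetStrip row "entity" ≠ ""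
    · by_cases hc : C.contains (pvGetStrip row "entity_key") = false
      · rw [if_pos ⟨h1.1, h1.2, hc⟩, PySem.Dict.get?_insert]
        have hC : C.get? (pvGetStrip row "entity_key") = none := by
          rw [PySem.Dict.get?_eq_none_iff_contains]; exact hc
        by_cases hx : x = pvGetStrip row "entity_key"
        · subst hx
          rw [if_pos rfl, hC, if_pos ⟨h1.1, h1.2, rfl⟩]
          simp
        · rw [if_neg hx, if_neg (by tauto)]
      · have hc' : C.contains (pvGetStrip row "entity_key") = true := by
          revert hc; cases C.contains (pvGetStrip row "entity_key") <;> simp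
        rw [if_neg (by simp [hc'])]
        by_cases hx : pvGetStrip row "entity_key" = x
        · have hne : C.get? x ≠ none := by
            intro h
            rw [PySem.Dict.get?_eq_none_iff_contains, ← hx, hc'] at h
            simp at h
          cases hCx : C.get? x with
          | none => exact absurd hCx hne
          | some v => rw [if_pos ⟨h1.1, h1.2, hx⟩]; simp
        · rw [if_neg (by tauto)]
    · rw [if_neg (by tauto), if_neg (by tauto)]

-- A's label lookup equals B's per-key scan
lemma pointwise_value (mrows crows : List (List (String × String))) (k : String) :
    ((mrows.foldl (fun d row =>
      let key := pvGetStrip row "entity_key"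
      let label := pvGetStrip row "entity"
      if key ≠ "" ∧ label ≠ "" ∧ d.contains key = false then d.insert key label else d)
      (crows.foldl (fun d row =>
        let key := pvGetStrip row "slug"
        let label := pvGetStrip row "name"
        if key ≠ "" ∧ label ≠ "" then d.insert key label else d) PySem.Dict.empty)).getD k k)
    = pvLookup mrows crows k := by
  rw [PySem.Dict.getD_eq_get?_getD, mention_get, comp_get, pvLookup]
  cases pvFirstMatch crows.reverse "slug" "name" k with
  | some v => simp
  | none =>
    cases pvFirstMatch mrows "entity_key" "entity" k <;> simp

-- ===== VERDICT (by name: the statement is the Claim_ definition above) =====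
theorem build_labels_by_key_spec : Claim_equal_build_labels_by_key := by
  intro ordered_entity_keys mention_rows competitor_rows _
  unfold Spec_build_labels_by_key build_labels_by_key build_labels_by_key_alt
  simp only [pointwise_value mention_rows competitor_rows]
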